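-- pv_equiv track=rewrite | github.com/mans-best-friend/ce-archeo-pipeline | pipeline/01_pdf_extractor_local.py | deduplicate_sites
-- ===== SOURCE A (Python) =====
-- def deduplicate_sites(sites: list) -> list:
--     seen = {}
--     for site in sites:
--         key = (
--             (site.get("site_name") or "").lower().strip(),
--             (site.get("location_description") or "").lower().strip()[:80]
--         )
--         if key == ("", ""):
--             continue
--         if key not in seen:
--             seen[key] = site
--         else:
--             existing = seen[key]
--             for field, value in site.items():
--                 if value and not existing.get(field):
--                     existing[field] = value
--     return list(seen.values())
-- ===== SOURCE B (Python) =====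
-- def deduplicate_sites(sites: list) -> list:
--     def _key(site):
--         return ((site.get("site_name") or "").lower().strip(),
--                 (site.get("location_description") or "").lower().strip()[:80])
--
--     # Partition-based worklist: no dict at all. Repeatedly take the head of the
--     # remaining list, gather its whole same-key group by a forward scan, merge the
--     # group into the head record (mutated in place, like A), and drop the group
--     # from the worklist.
--     result = []
--     pending = list(sites)
--     while pending:
--         base = pending[0]
--         rest = pending[1:]
--         k = _key(base)
--         if k == ("", ""):
--             pending = rest
--             continue
--         group = [t for t in rest if _key(t) == k]
--         for dup in group:
--             for field, value in dup.items():
--                 if value and not base.get(field):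
--                     base[field] = value
--         result.append(base)
--         pending = [t for t in rest if _key(t) != k]
--     return result
-- ===== Notes on version B (the rewrite author's own statement) =====
-- stated objective: alternative
-- what changed: Drops A's hash dict entirely: B is a partition-based worklist algorithm that repeatedly takes the head of the remaining list, gathers its whole normalized-key group by a forward scan, merges the group into the head record, and filters the group out of the worklist (quadratic scans instead of a dict).
import Mathlib
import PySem

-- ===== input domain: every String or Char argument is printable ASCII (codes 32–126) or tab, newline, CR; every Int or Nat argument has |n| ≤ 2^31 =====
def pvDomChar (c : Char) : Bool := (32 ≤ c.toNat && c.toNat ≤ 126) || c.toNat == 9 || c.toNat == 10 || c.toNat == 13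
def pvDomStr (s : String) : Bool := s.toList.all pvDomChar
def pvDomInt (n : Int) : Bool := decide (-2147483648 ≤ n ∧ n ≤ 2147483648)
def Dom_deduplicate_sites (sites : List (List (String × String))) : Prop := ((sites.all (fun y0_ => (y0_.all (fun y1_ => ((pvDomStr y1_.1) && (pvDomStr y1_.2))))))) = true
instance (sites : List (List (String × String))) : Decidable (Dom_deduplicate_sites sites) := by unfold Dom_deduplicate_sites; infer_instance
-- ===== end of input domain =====

-- B replaces A's merge-as-you-go hash dict with a dict-free partition-based worklist:
-- take the head of the remaining list, gather its whole normalized-key group by a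
-- forward scan, merge the group into the head record, and filter the group out of the
-- worklist. Same return value, proved equal. (Both Pythons mutate the first-seen input
-- dicts in place in the same way; the Lean equivalence is about the return value.)

-- shared key helper: ((site.get("site_name") or "").lower().strip(),
--                    (site.get("location_description") or "").lower().strip()[:80])
def pvSiteKey (site : List (String × String)) : String × String :=
  (PySem.Str.strip (PySem.Str.lower (((PySem.Dict.mk site).get? "site_name").getD "")),
   PySem.Str.slice (PySem.Str.strip (PySem.Str.lower (((PySem.Dict.mk site).get? "location_description").getD ""))) none (some 80))

-- shared inner loop: 'for field, value in dup.items(): if value and not base.get(field): base[field] = value'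
def pvFill (base dup : List (String × String)) : List (String × String) :=
  dup.foldl (fun ex fv =>
    if fv.2 ≠ "" ∧ (PySem.Dict.mk ex).getD fv.1 "" = "" then
      ((PySem.Dict.mk ex).insert fv.1 fv.2).items
    else ex) base

-- ===== PORT A =====
-- loop body of A: skip empty key; first occurrence is stored; a duplicate is merged into the stored record
def pvStepA (seen : PySem.Dict (String × String) (List (String × String)))
    (site : List (String × String)) : PySem.Dict (String × String) (List (String × String)) :=
  let key := pvSiteKey site
  if key = ("", "") then seen
  else if seen.contains key = false then seen.insert key site
  else seen.insert key (pvFill (seen.getD key []) site)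

def deduplicate_sites (sites : List (List (String × String))) : List (List (String × String)) :=
  (sites.foldl pvStepA PySem.Dict.empty).values

-- ===== PORT B =====
-- the while loop of B: result accumulator, pending worklist
def pvBloop (result : List (List (String × String))) :
    List (List (String × String)) → List (List (String × String))
  | [] => result
  | base :: rest =>
    let k := pvSiteKey base
    if k = ("", "") then pvBloop result rest
    else
      let merged := (rest.filter (fun t => pvSiteKey t == k)).foldl pvFill base
      pvBloop (result ++ [merged]) (rest.filter (fun t => pvSiteKey t != k))
  termination_by pending => pending.length
  decreasing_by
  · simp
  · have := List.length_filter_le (fun t => pvSiteKey t != pvSiteKey base) rest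
    simp; omega

def deduplicate_sites_alt (sites : List (List (String × String))) : List (List (String × String)) :=
  pvBloop [] sites

-- ===== PRECONDITION & SPEC =====
def Spec_deduplicate_sites (sites : List (List (String × String))) (out : List (List (String × String))) : Prop := out = deduplicate_sites_alt sites
instance (sites : List (List (String × String))) (out : List (List (String × String))) : Decidable (Spec_deduplicate_sites sites out) := by unfold Spec_deduplicate_sites; infer_instance

-- ===== CLAIM (what is proved, stated in full; the proofs are below) =====
def Claim_equal_deduplicate_sites : Prop := ∀ (sites : List (List (String × String))), Dom_deduplicate_sites sites → Spec_deduplicate_sites sites (deduplicate_sites sites)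

-- ===== LEMMAS AND PROOFS =====

-- B's loop with the output key attached to each record (proof-only helper)
def pvBk : List (List (String × String)) → List ((String × String) × List (String × String))
  | [] => []
  | base :: rest =>
    if pvSiteKey base = ("", "") then pvBk rest
    else (pvSiteKey base, (rest.filter (fun t => pvSiteKey t == pvSiteKey base)).foldl pvFill base)
         :: pvBk (rest.filter (fun t => pvSiteKey t != pvSiteKey base))
  termination_by pending => pending.length
  decreasing_by
  · simp
  · have := List.length_filter_le (fun t => pvSiteKey t != pvSiteKey base) rest
    simp; omega

lemma pvBloop_eq_pvBk_aux (n : Nat) : ∀ (pending : List (List (String × String))),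
    pending.length ≤ n → ∀ result,
    pvBloop result pending = result ++ (pvBk pending).map Prod.snd := by
  induction n with
  | zero =>
    intro pending hlen result
    have : pending = [] := List.eq_nil_of_length_eq_zero (Nat.le_zero.mp hlen)
    subst this; simp [pvBloop, pvBk]
  | succ n ih =>
    intro pending hlen result
    match pending with
    | [] => simp [pvBloop, pvBk]
    | base :: rest =>
      rw [pvBloop, pvBk]
      have hr : rest.length ≤ n := by simpa using hlen
      by_cases hk : pvSiteKey base = ("", "")
      · simp only [hk, if_pos]
        exact ih rest hr result
      · simp only [hk, ite_false]
        have hf : (rest.filter (fun t => pvSiteKey t != pvSiteKey base)).length ≤ n :=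
          le_trans (List.length_filter_le _ _) hr
        rw [ih _ hf]
        simp

lemma pvBloop_eq_pvBk (pending result : List (List (String × String))) :
    pvBloop result pending = result ++ (pvBk pending).map Prod.snd :=
  pvBloop_eq_pvBk_aux pending.length pending le_rfl result

-- the main invariant: A's fold over any clean dict = merged existing entries ++ B's keyed run on the unseen part
lemma pvMain (sites : List (List (String × String)))
    (seen : PySem.Dict (String × String) (List (String × String)))
    (hnd : seen.keys.Nodup) (hemp : ("", "") ∉ seen.keys) :
    (sites.foldl pvStepA seen).items =
      seen.items.map (fun p => (p.1, (sites.filter (fun t => pvSiteKey t == p.1)).foldl pvFill p.2))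
      ++ pvBk (sites.filter (fun t => !(seen.contains (pvSiteKey t)))) := by
  induction sites generalizing seen with
  | nil => simp [pvBk]
  | cons s rest ih =>
    have hp1 : ∀ p ∈ seen.items, p.1 ∈ seen.keys := fun p hp => by
      simp only [PySem.Dict.keys]; exact List.mem_map.mpr ⟨p, hp, rfl⟩
    by_cases hk : pvSiteKey s = ("", "")
    · have eA : pvStepA seen s = seen := by simp [pvStepA, hk]
      have hcf : seen.contains (pvSiteKey s) = false := by
        rw [hk]
        by_contra h
        exact hemp ((PySem.Dict.contains_iff_mem_keys seen _).mp (by simpa using h))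
      have hmap : seen.items.map (fun p => (p.1, (((s :: rest).filter (fun t => pvSiteKey t == p.1)).foldl pvFill p.2)))
          = seen.items.map (fun p => (p.1, ((rest.filter (fun t => pvSiteKey t == p.1)).foldl pvFill p.2))) := by
        refine List.map_congr_left (fun p hp => ?_)
        have hne : (pvSiteKey s == p.1) = false := by
          have : p.1 ≠ ("", "") := fun h => hemp (h ▸ hp1 p hp)
          simp [hk]; exact fun h => this h.symm
        rw [List.filter_cons_of_neg (by simp [hne])]
      have hfB : (s :: rest).filter (fun t => !(seen.contains (pvSiteKey t)))
          = s :: rest.filter (fun t => !(seen.contains (pvSiteKey t))) :=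
        List.filter_cons_of_pos (by simp [hcf])
      rw [List.foldl_cons, eA, ih seen hnd hemp, hmap, hfB, pvBk]
      simp [hk]
    · by_cases hc : seen.contains (pvSiteKey s) = true
      · -- duplicate of an existing key: A merges into the stored record
        set k := pvSiteKey s with hkdef
        set v := seen.getD k [] with hvdef
        have eA : pvStepA seen s = seen.insert k (pvFill v s) := by
          simp [pvStepA, hk, hc, ← hkdef, ← hvdef]
        have hkeys' : (seen.insert k (pvFill v s)).keys = seen.keys :=
          PySem.Dict.keys_insert_of_contains seen _ hc
        have hnd' : (seen.insert k (pvFill v s)).keys.Nodup := by rw [hkeys']; exact hnd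
        have hemp' : ("", "") ∉ (seen.insert k (pvFill v s)).keys := by rw [hkeys']; exact hemp
        have hcsame : ∀ t, (seen.insert k (pvFill v s)).contains (pvSiteKey t) = seen.contains (pvSiteKey t) := by
          intro t
          rw [PySem.Dict.contains_insert]
          by_cases h : pvSiteKey t = k
          · simp [h, hc]
          · simp [h]
        have hmap : (seen.insert k (pvFill v s)).items.map (fun p => (p.1, ((rest.filter (fun t => pvSiteKey t == p.1)).foldl pvFill p.2)))
            = seen.items.map (fun p => (p.1, (((s :: rest).filter (fun t => pvSiteKey t == p.1)).foldl pvFill p.2))) := by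
          rw [PySem.Dict.items_insert_of_contains seen _ hc, List.map_map]
          refine List.map_congr_left (fun p hp => ?_)
          by_cases hpk : p.1 = k
          · have hpv : p.2 = v := by
              have := PySem.Dict.getD_of_mem_items (d := seen) (hpk ▸ hp : (k, p.2) ∈ seen.items) hnd []
              rw [hvdef, this]
            simp only [Function.comp, hpk, beq_self_eq_true, if_pos]
            rw [List.filter_cons_of_pos (by simp [← hkdef])]
            rw [List.foldl_cons, hpv]
          · simp only [Function.comp, show (p.1 == k) = false by simp [hpk], Bool.false_eq_true, if_false]
            rw [List.filter_cons_of_neg (by simp only [← hkdef, Bool.not_eq_true, beq_eq_false_iff_ne, ne_eq]; exact fun h => hpk h.symm)]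
        have hfB : (s :: rest).filter (fun t => !(seen.contains (pvSiteKey t)))
            = rest.filter (fun t => !((seen.insert k (pvFill v s)).contains (pvSiteKey t))) := by
          rw [List.filter_cons_of_neg (by simp [← hkdef, hc])]
          exact (List.filter_congr (fun t _ => by rw [hcsame t])).symm
        rw [List.foldl_cons, eA, ih _ hnd' hemp', hmap, ← hfB]
      · -- fresh key: A appends
        set k := pvSiteKey s with hkdef
        have hc' : seen.contains k = false := by simpa using hc
        have eA : pvStepA seen s = seen.insert k s := by simp [pvStepA, hk, hc', ← hkdef]
        have hknm : k ∉ seen.keys := fun h => by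
          rw [(PySem.Dict.contains_iff_mem_keys seen k).mpr h] at hc'; exact absurd hc' (by simp)
        have hnd' : (seen.insert k s).keys.Nodup := PySem.Dict.nodup_keys_insert seen k s hnd
        have hemp' : ("", "") ∉ (seen.insert k s).keys := by
          rw [PySem.Dict.keys_insert_of_not_contains seen _ hc']
          simp only [List.mem_append, List.mem_singleton]
          exact fun h => h.elim hemp (fun h' => hk h'.symm)
        rw [List.foldl_cons, eA, ih _ hnd' hemp']
        rw [PySem.Dict.items_insert_of_not_contains seen _ hc', List.map_append]
        have hmap : (seen.items.map (fun p => (p.1, (rest.filter (fun t => pvSiteKey t == p.1)).foldl pvFill p.2)))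
            = seen.items.map (fun p => (p.1, ((s :: rest).filter (fun t => pvSiteKey t == p.1)).foldl pvFill p.2)) := by
          refine List.map_congr_left (fun p hp => ?_)
          have hpk : p.1 ≠ k := fun h => hknm (h ▸ hp1 p hp)
          rw [List.filter_cons_of_neg (by simp [← hkdef]; exact fun h => hpk h.symm)]
        rw [hmap]
        have hfB : (s :: rest).filter (fun t => !(seen.contains (pvSiteKey t)))
            = s :: rest.filter (fun t => !(seen.contains (pvSiteKey t))) :=
          List.filter_cons_of_pos (by simp [← hkdef, hc'])
        rw [hfB, pvBk]
        simp only [← hkdef, hk, ite_false]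
        have hg : (rest.filter (fun t => !(seen.contains (pvSiteKey t)))).filter (fun t => pvSiteKey t == k)
            = rest.filter (fun t => pvSiteKey t == k) := by
          rw [List.filter_filter]
          refine List.filter_congr (fun t _ => ?_)
          by_cases h : pvSiteKey t = k
          · simp [h, hc']
          · simp [h]
        have hr : (rest.filter (fun t => !(seen.contains (pvSiteKey t)))).filter (fun t => pvSiteKey t != k)
            = rest.filter (fun t => !((seen.insert k s).contains (pvSiteKey t))) := by
          rw [List.filter_filter]
          refine List.filter_congr (fun t _ => ?_)
          rw [PySem.Dict.contains_insert]
          by_cases h : pvSiteKey t = k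
          · simp [h, hc']
          · simp [bne]
        rw [hg, hr]
        simp

-- ===== VERDICT (by name: the statement is the Claim_ definition above) =====
theorem deduplicate_sites_spec : Claim_equal_deduplicate_sites := by
  intro sites _
  show deduplicate_sites sites = deduplicate_sites_alt sites
  have h := pvMain sites (PySem.Dict.empty : PySem.Dict (String × String) (List (String × String)))
    (by simp [PySem.Dict.keys_empty]) (by simp [PySem.Dict.keys_empty])
  have hfilt : sites.filter (fun t => !((PySem.Dict.empty : PySem.Dict (String × String) (List (String × String))).contains (pvSiteKey t))) = sites :=
    List.filter_eq_self.mpr (fun t _ => by simp [PySem.Dict.contains_empty])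
  rw [hfilt] at h
  simp only [deduplicate_sites, deduplicate_sites_alt, PySem.Dict.values, h, pvBloop_eq_pvBk]
  simp [PySem.Dict.empty]
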